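-- pv_equiv track=rewrite | github.com/maqboolahmed24/Vecells | tools/analysis/build_seed_data_and_simulator_strategy.py | supported_simulator_ids
-- ===== SOURCE A (Python) =====
-- from typing import Any
--
-- def supported_simulator_ids(reference_cases: list[dict[str, Any]]) -> list[str]:
--     return sorted(
--         {
--             simulator_id
--             for case_row in reference_cases
--             for simulator_id in case_row["requiredSimulatorRefs"]
--         }
--     )
-- ===== SOURCE B (Python) =====
-- def supported_simulator_ids(reference_cases):
--     all_ids = []
--     for case_row in reference_cases:
--         all_ids.extend(case_row["requiredSimulatorRefs"])
--     all_ids.sort()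
--     result = []
--     for sid in all_ids:
--         if not result or result[-1] != sid:
--             result.append(sid)
--     return result
-- ===== Notes on version B (the rewrite author's own statement) =====
-- stated objective: alternative
-- what changed: Replaces the set comprehension + sorted(set) with a flat concatenation of all ids, an in-place sort of the full multiset, and a single linear adjacent-duplicate scan to deduplicate.
import Mathlib
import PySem

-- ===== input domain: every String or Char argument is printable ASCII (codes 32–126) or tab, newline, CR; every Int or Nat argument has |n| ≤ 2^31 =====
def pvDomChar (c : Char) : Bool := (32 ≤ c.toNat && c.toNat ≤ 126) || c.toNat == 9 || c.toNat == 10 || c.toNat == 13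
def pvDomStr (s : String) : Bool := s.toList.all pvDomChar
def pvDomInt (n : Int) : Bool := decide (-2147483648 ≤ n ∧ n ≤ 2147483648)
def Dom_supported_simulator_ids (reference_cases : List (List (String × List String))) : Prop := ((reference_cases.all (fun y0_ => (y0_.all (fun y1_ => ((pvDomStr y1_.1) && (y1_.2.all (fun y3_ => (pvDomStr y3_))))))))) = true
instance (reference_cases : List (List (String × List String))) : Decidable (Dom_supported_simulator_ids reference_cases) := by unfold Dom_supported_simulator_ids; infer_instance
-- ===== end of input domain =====

-- B replaces the set comprehension + sorted(set) by concatenate-all, sort, then one adjacent-duplicate scan; alternative decomposition, same cost.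


-- ===== PORT A =====
-- sorted({sid for row in reference_cases for sid in row["requiredSimulatorRefs"]})
def supported_simulator_ids (reference_cases : List (List (String × List String))) : List String :=
  PySem.List.sorted
    (PySem.Set.ofList
      (reference_cases.flatMap
        (fun case_row => ((PySem.Dict.mk case_row).get? "requiredSimulatorRefs").getD [])))
    (fun x => x) false

-- ===== PORT B =====
-- concatenate all ids, sort the full list, then drop adjacent duplicates in one scan
def supported_simulator_ids_alt (reference_cases : List (List (String × List String))) : List String :=
  let all_ids := reference_cases.foldl
    (fun acc case_row => acc ++ ((PySem.Dict.mk case_row).get? "requiredSimulatorRefs").getD []) []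
  let sorted_ids := PySem.List.sorted all_ids (fun x => x) false
  sorted_ids.foldl (fun result sid => if result.getLast? = some sid then result else result ++ [sid]) []

-- ===== PRECONDITION & SPEC =====
-- Pre_ excludes rows missing the "requiredSimulatorRefs" key, where both programs raise KeyError.
def Pre_supported_simulator_ids (reference_cases : List (List (String × List String))) : Prop :=
  ∀ case_row ∈ reference_cases, (PySem.Dict.mk case_row).contains "requiredSimulatorRefs" = true
instance (reference_cases : List (List (String × List String))) : Decidable (Pre_supported_simulator_ids reference_cases) := by unfold Pre_supported_simulator_ids; infer_instance

def pvWitness_supported_simulator_ids : (List (List (String × List String))) :=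
  [[("requiredSimulatorRefs", ["b", "a", "b"])], [("requiredSimulatorRefs", ["a", "c"])]]

def Spec_supported_simulator_ids (reference_cases : List (List (String × List String))) (out : List String) : Prop := out = supported_simulator_ids_alt reference_cases
instance (reference_cases : List (List (String × List String))) (out : List String) : Decidable (Spec_supported_simulator_ids reference_cases out) := by unfold Spec_supported_simulator_ids; infer_instance

-- ===== CLAIM (what is proved, stated in full; the proofs are below) =====
def Claim_equal_supported_simulator_ids : Prop := ∀ (reference_cases : List (List (String × List String))), Dom_supported_simulator_ids reference_cases → Pre_supported_simulator_ids reference_cases → Spec_supported_simulator_ids reference_cases (supported_simulator_ids reference_cases)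

-- ===== LEMMAS AND PROOFS =====

-- in a strictly increasing list, every element is at most the last one
theorem le_getLast?_of_pairwise_lt (l : List String)
    (hl : l.Pairwise (· < ·)) : ∀ a ∈ l, ∃ m, l.getLast? = some m ∧ a ≤ m := by
  induction l with
  | nil => intro a ha; cases ha
  | cons x t ih =>
    rcases List.pairwise_cons.mp hl with ⟨hx, ht⟩
    intro a ha
    cases t with
    | nil =>
      rcases List.mem_singleton.mp ha with rfl
      exact ⟨a, rfl, le_refl a⟩
    | cons y u =>
      rcases List.mem_cons.mp ha with rfl | hmem
      · rcases ih ht y List.mem_cons_self with ⟨m, hm, hym⟩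
        exact ⟨m, by simpa using hm, le_of_lt (lt_of_lt_of_le (hx y List.mem_cons_self) hym)⟩
      · rcases ih ht a hmem with ⟨m, hm, ham⟩
        exact ⟨m, by simpa using hm, ham⟩

-- invariant of the adjacent-duplicate scan over a ≤-sorted input
theorem dedupAdj_inv (l : List String) :
    ∀ acc : List String, l.Pairwise (· ≤ ·) → acc.Pairwise (· < ·) →
    (∀ b ∈ l, ∀ a ∈ acc, a ≤ b) →
    (l.foldl (fun result sid => if result.getLast? = some sid then result else result ++ [sid]) acc).Pairwise (· < ·) ∧
    (∀ x, x ∈ l.foldl (fun result sid => if result.getLast? = some sid then result else result ++ [sid]) acc ↔ x ∈ acc ∨ x ∈ l) := by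
  induction l with
  | nil => intro acc _ hacc _; exact ⟨hacc, fun x => by simp⟩
  | cons b t ih =>
    intro acc hl hacc hb
    rcases List.pairwise_cons.mp hl with ⟨hbt, ht⟩
    simp only [List.foldl_cons]
    by_cases hlast : acc.getLast? = some b
    · rw [if_pos hlast]
      have hbmem : b ∈ acc := List.mem_of_getLast? hlast
      have hb' : ∀ c ∈ t, ∀ a ∈ acc, a ≤ c := fun c hc a ha => hb c (List.mem_cons_of_mem _ hc) a ha
      rcases ih acc ht hacc hb' with ⟨h1, h2⟩
      refine ⟨h1, fun x => ?_⟩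
      rw [h2 x]
      constructor
      · rintro (h | h) <;> simp [h]
      · rintro (h | h)
        · exact Or.inl h
        · rcases List.mem_cons.mp h with rfl | h
          · exact Or.inl hbmem
          · exact Or.inr h
    · rw [if_neg hlast]
      have hltb : ∀ a ∈ acc, a < b := by
        intro a ha
        rcases le_getLast?_of_pairwise_lt acc hacc a ha with ⟨m, hm, ham⟩
        have hmmem : m ∈ acc := List.mem_of_getLast? hm
        have hmb : m ≤ b := hb b List.mem_cons_self m hmmem
        rcases lt_or_eq_of_le hmb with h | h
        · exact lt_of_le_of_lt ham h
        · exact absurd (h ▸ hm) hlast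
      have hacc' : (acc ++ [b]).Pairwise (· < ·) := by
        rw [List.pairwise_append]
        exact ⟨hacc, List.pairwise_singleton _ _, fun a ha c hc => (List.mem_singleton.mp hc) ▸ hltb a ha⟩
      have hb' : ∀ c ∈ t, ∀ a ∈ acc ++ [b], a ≤ c := by
        intro c hc a ha
        rcases List.mem_append.mp ha with h | h
        · exact hb c (List.mem_cons_of_mem _ hc) a h
        · exact (List.mem_singleton.mp h) ▸ hbt c hc
      rcases ih (acc ++ [b]) ht hacc' hb' with ⟨h1, h2⟩
      refine ⟨h1, fun x => ?_⟩
      rw [h2 x]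
      simp [List.mem_append, or_assoc]

-- ===== VERDICT (by name: the statement is the Claim_ definition above) =====
theorem supported_simulator_ids_spec : Claim_equal_supported_simulator_ids := by
  intro rcs _ _
  unfold Spec_supported_simulator_ids supported_simulator_ids supported_simulator_ids_alt
  rw [PySem.List.foldl_append_eq_flatMap]
  set xs := rcs.flatMap (fun case_row => ((PySem.Dict.mk case_row).get? "requiredSimulatorRefs").getD []) with hxs
  simp only [List.nil_append]
  have hsorted_le : (PySem.List.sorted xs (fun x => x) false).Pairwise (· ≤ ·) := by
    simpa using PySem.List.sorted_pairwise xs (fun x => x)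
  rcases dedupAdj_inv (PySem.List.sorted xs (fun x => x) false) [] hsorted_le List.Pairwise.nil
    (by intro b _ a ha; cases ha) with ⟨hlt, hmem⟩
  apply PySem.List.sorted_eq_of_perm_of_pairwise_lt
  · rw [List.perm_ext_iff_of_nodup (hlt.imp ne_of_lt) (PySem.Set.nodup_ofList xs)]
    intro a
    rw [hmem a, PySem.Set.mem_ofList, PySem.List.mem_sorted]
    simp
  · simpa using hlt
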